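-- pv_equiv track=rewrite | github.com/Couchy-wu/PLDP-FEBSF | soucedisturb.py | GetRawdatacount
-- ===== SOURCE A (Python) =====
-- def GetRawdatacount(sourcedata, datadomain):
--     """
--     The role of this function is mainly based on the given original data and data set, to obtain the number of values on each value field.
--     sourcdata:raw data
--     datadomain:Value range of the data
--     return countlist:List of values on each value field
--     """
--     my_dict = dict()
--     n = len(datadomain)
--     for i in range(n):
--         my_dict[datadomain[i]] = i
--     countlist = [0] * n
--     N = len(sourcedata)
--     for i in range(N):
--         if sourcedata[i] in my_dict.keys():
--             countlist[my_dict[sourcedata[i]]] += 1  # count plus one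
--     return countlist  # Return the final result
-- ===== SOURCE B (Python) =====
-- def GetRawdatacount(sourcedata, datadomain):
--     # Frequency table of the data first, then distribute into domain slots
--     # (last index wins for duplicate domain values, as in the original).
--     counts = {}
--     for s in sourcedata:
--         counts[s] = counts.get(s, 0) + 1
--     last = {v: i for i, v in enumerate(datadomain)}
--     countlist = [0] * len(datadomain)
--     for v, i in last.items():
--         countlist[i] = counts.get(v, 0)
--     return countlist
-- ===== Notes on version B (the rewrite author's own statement) =====
-- stated objective: alternative
-- what changed: Instead of mapping each domain value to its index and incrementing per data element, B builds a value->count frequency table of sourcedata in one pass and a value->last-index map of datadomain, then writes each count directly into its domain slot.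
import Mathlib
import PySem

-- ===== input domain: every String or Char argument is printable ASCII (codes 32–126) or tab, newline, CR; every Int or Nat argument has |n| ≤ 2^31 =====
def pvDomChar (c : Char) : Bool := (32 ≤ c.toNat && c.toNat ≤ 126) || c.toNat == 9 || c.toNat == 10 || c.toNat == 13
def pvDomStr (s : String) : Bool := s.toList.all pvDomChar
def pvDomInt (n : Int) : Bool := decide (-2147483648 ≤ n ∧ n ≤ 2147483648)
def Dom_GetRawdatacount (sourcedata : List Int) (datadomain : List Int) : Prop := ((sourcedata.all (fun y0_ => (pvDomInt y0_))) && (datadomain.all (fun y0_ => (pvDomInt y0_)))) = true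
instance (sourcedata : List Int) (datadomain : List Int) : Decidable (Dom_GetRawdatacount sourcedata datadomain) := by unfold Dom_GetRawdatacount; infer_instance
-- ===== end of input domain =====

-- B replaces A's value→index map plus per-element increments by a one-pass value→count
-- frequency table distributed into the domain slots (alternative decomposition, same cost).

-- ===== PORT A =====
def GetRawdatacount (sourcedata : List Int) (datadomain : List Int) : List Int :=
  let n : Int := (datadomain.length : Int)
  let myDict : PySem.Dict Int Int :=
    (PySem.List.pyRange 0 n 1).foldl
      (fun d i => d.insert (PySem.List.pyGetD datadomain i 0) i) PySem.Dict.empty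
  let countlist : List Int := PySem.List.pyRepeat [0] n
  let N : Int := (sourcedata.length : Int)
  (PySem.List.pyRange 0 N 1).foldl
    (fun cl i =>
      if myDict.contains (PySem.List.pyGetD sourcedata i 0) then
        PySem.List.pySetD cl (myDict.getD (PySem.List.pyGetD sourcedata i 0) 0)
          (PySem.List.pyGetD cl (myDict.getD (PySem.List.pyGetD sourcedata i 0) 0) 0 + 1)
      else cl) countlist

-- ===== PORT B =====
def GetRawdatacount_alt (sourcedata : List Int) (datadomain : List Int) : List Int :=
  let counts : PySem.Dict Int Int :=
    sourcedata.foldl (fun c s => c.insert s (c.getD s 0 + 1)) PySem.Dict.empty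
  let last : PySem.Dict Int Int :=
    (PySem.List.enumerate datadomain 0).foldl (fun m p => m.insert p.2 p.1) PySem.Dict.empty
  let countlist : List Int := PySem.List.pyRepeat [0] (datadomain.length : Int)
  last.items.foldl (fun cl p => PySem.List.pySetD cl p.2 (counts.getD p.1 0)) countlist

-- ===== PRECONDITION & SPEC =====
def Spec_GetRawdatacount (sourcedata : List Int) (datadomain : List Int) (out : List Int) : Prop := out = GetRawdatacount_alt sourcedata datadomain
instance (sourcedata : List Int) (datadomain : List Int) (out : List Int) : Decidable (Spec_GetRawdatacount sourcedata datadomain out) := by unfold Spec_GetRawdatacount; infer_instance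

-- ===== CLAIM (what is proved, stated in full; the proofs are below) =====
def Claim_equal_GetRawdatacount : Prop := ∀ (sourcedata : List Int) (datadomain : List Int), Dom_GetRawdatacount sourcedata datadomain → Spec_GetRawdatacount sourcedata datadomain (GetRawdatacount sourcedata datadomain)

-- ===== LEMMAS AND PROOFS =====

-- the value→last-index dict both programs build (A over range(n), B over enumerate)
def pvLastDict (datadomain : List Int) : PySem.Dict Int Int :=
  (PySem.List.pyRange 0 (datadomain.length : Int) 1).foldl
    (fun d i => d.insert (PySem.List.pyGetD datadomain i 0) i) PySem.Dict.empty

-- last index j < k with datadomain[j] = v, as a spec-side recursion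
def pvLastIdx (datadomain : List Int) (v : Int) : Nat → Option Int
  | 0 => none
  | k+1 => if PySem.List.pyGetD datadomain (k : Int) 0 = v then some (k : Int)
           else pvLastIdx datadomain v k

theorem pvLastDict_get?_aux (datadomain : List Int) (v : Int) (k : Nat) :
    ((PySem.List.pyRange 0 (k : Int) 1).foldl
      (fun d i => d.insert (PySem.List.pyGetD datadomain i 0) i) PySem.Dict.empty).get? v
    = pvLastIdx datadomain v k := by
  induction k with
  | zero => simp [PySem.List.pyRange, pvLastIdx, PySem.Dict.get?_empty]
  | succ k ih =>
    rw [show ((k+1 : Nat) : Int) = (k : Int) + 1 by push_cast; ring,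
        PySem.List.pyRange_one_succ_right (by positivity), List.foldl_append]
    simp only [List.foldl_cons, List.foldl_nil, PySem.Dict.get?_insert, pvLastIdx]
    rw [ih]
    simp only [eq_comm]

theorem pvLastIdx_bounds (datadomain : List Int) (v : Int) (k : Nat) (j : Int)
    (h : pvLastIdx datadomain v k = some j) :
    0 ≤ j ∧ j.toNat < k ∧ PySem.List.pyGetD datadomain j 0 = v := by
  induction k with
  | zero => simp [pvLastIdx] at h
  | succ k ih =>
    rw [pvLastIdx] at h
    split at h
    · rename_i hk
      obtain rfl : (k : Int) = j := by simpa using h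
      refine ⟨by positivity, by simp, hk⟩
    · obtain ⟨h0, h1, h2⟩ := ih h
      exact ⟨h0, Nat.lt_succ_of_lt h1, h2⟩

theorem pvLastIdx_inj (datadomain : List Int) (v w : Int) (k : Nat) (j : Int)
    (hv : pvLastIdx datadomain v k = some j) (hw : pvLastIdx datadomain w k = some j) :
    v = w := by
  have h1 := (pvLastIdx_bounds datadomain v k j hv).2.2
  have h2 := (pvLastIdx_bounds datadomain w k j hw).2.2
  rw [← h1, ← h2]

def pvStepA (m : PySem.Dict Int Int) (cl : List Int) (s : Int) : List Int :=
  if m.contains s then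
    PySem.List.pySetD cl (m.getD s 0) (PySem.List.pyGetD cl (m.getD s 0) 0 + 1)
  else cl

theorem pvStepA_length (m : PySem.Dict Int Int) (cl : List Int) (s : Int) :
    (pvStepA m cl s).length = cl.length := by
  unfold pvStepA; split <;> simp [PySem.List.length_pySetD]

theorem pvFoldA_length (m : PySem.Dict Int Int) (src cl : List Int) :
    (src.foldl (pvStepA m) cl).length = cl.length := by
  induction src generalizing cl with
  | nil => rfl
  | cons s t ih => simp [List.foldl_cons, ih, pvStepA_length]

theorem pvFoldA_char (m : PySem.Dict Int Int) (src : List Int) :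
    ∀ (cl : List Int) (j : Nat) (hj : j < cl.length),
    (∀ v t, m.get? v = some t → 0 ≤ t ∧ t.toNat < cl.length) →
    (src.foldl (pvStepA m) cl)[j]'(by rw [pvFoldA_length]; exact hj)
      = cl[j] + (src.countP (fun s => m.get? s == some (j : Int)) : Int) := by
  induction src with
  | nil => simp
  | cons s t ih =>
    intro cl j hj hm
    simp only [List.foldl_cons, List.countP_cons]
    rcases hg : m.get? s with _ | i
    · have hc : m.contains s = false := by
        rw [PySem.Dict.contains_eq_isSome_get?, hg]; rfl
      simp only [show pvStepA m cl s = cl by unfold pvStepA; rw [hc]; rfl]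
      simp [ih cl j hj hm]
    · obtain ⟨h0, h1⟩ := hm s i hg
      have hc : m.contains s = true := by
        rw [PySem.Dict.contains_eq_isSome_get?, hg]; rfl
      have hgd : m.getD s 0 = i := by
        rw [PySem.Dict.getD_eq_get?_getD, hg]; rfl
      have hstep : pvStepA m cl s = cl.set i.toNat (cl[i.toNat]'h1 + 1) := by
        unfold pvStepA
        rw [hc, if_pos rfl, hgd, PySem.List.pySetD_of_nonneg _ _ h0,
            PySem.List.pyGetD_eq_getElem cl 0 h0 (by omega)]
      simp only [hstep]
      rw [ih _ j (by simpa using hj)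
            (by intro v u hvu; simpa using hm v u hvu)]
      by_cases hji : j = i.toNat
      · subst hji
        have hij : (some i == some ((i.toNat : Nat) : Int)) = true := by simp; omega
        rw [hij, List.getElem_set_self]
        norm_num; ring
      · have hij : (some i == some (j : Int)) = false := by simp; omega
        rw [hij, List.getElem_set_ne (by omega)]
        norm_num

theorem pvFoldB_length (F : Int → Int) (L : List (Int × Int)) (cl : List Int) :
    (L.foldl (fun cl p => PySem.List.pySetD cl p.2 (F p.1)) cl).length = cl.length := by
  induction L generalizing cl with
  | nil => rfl
  | cons p t ih => simp [List.foldl_cons, ih, PySem.List.length_pySetD]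

theorem pvFoldB_char (F : Int → Int) (L : List (Int × Int)) :
    ∀ (cl : List Int) (j : Nat) (hj : j < cl.length),
    (∀ p ∈ L, 0 ≤ p.2 ∧ p.2.toNat < cl.length) →
    (∀ p ∈ L, ∀ q ∈ L, p.2 = q.2 → p.1 = q.1) →
    (L.foldl (fun cl p => PySem.List.pySetD cl p.2 (F p.1)) cl)[j]'(by
        rw [pvFoldB_length]; exact hj)
      = match L.find? (fun p => p.2 == (j : Int)) with
        | some p => F p.1
        | none => cl[j] := by
  induction L with
  | nil => simp
  | cons p t ih =>
    intro cl j hj hb hinj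
    obtain ⟨hp0, hp1⟩ := hb p (List.mem_cons_self)
    have hset : PySem.List.pySetD cl p.2 (F p.1) = cl.set p.2.toNat (F p.1) :=
      PySem.List.pySetD_of_nonneg _ _ hp0
    simp only [List.foldl_cons, List.find?_cons, hset]
    have ihs := ih (cl.set p.2.toNat (F p.1)) j (by simpa using hj)
      (by intro q hq; simpa using hb q (List.mem_cons_of_mem _ hq))
      (by intro q hq r hr; exact hinj q (List.mem_cons_of_mem _ hq) r (List.mem_cons_of_mem _ hr))
    by_cases hpj : p.2 = (j : Int)
    · have hbeq : (p.2 == (j : Int)) = true := by simpa using hpj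
      simp only [hbeq, ihs]
      rcases hf : List.find? (fun p => p.2 == (j : Int)) t with _ | q
      · simp only [hf]
        rw [List.getElem_set, if_pos (by omega)]
      · have hq2 : q.2 = (j : Int) := by
          have := List.find?_some hf
          simpa using this
        have := hinj p List.mem_cons_self q
          (List.mem_cons_of_mem _ (List.mem_of_find?_eq_some hf)) (by rw [hpj, hq2])
        simp [hf, this]
    · have hbeq : (p.2 == (j : Int)) = false := by simpa using hpj
      simp only [hbeq, ihs]
      rcases hf : List.find? (fun p => p.2 == (j : Int)) t with _ | q
      · simp only [hf]
        rw [List.getElem_set, if_neg (by omega)]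
      · simp [hf]


theorem pvLastDict_get? (datadomain : List Int) (v : Int) :
    (pvLastDict datadomain).get? v = pvLastIdx datadomain v datadomain.length :=
  pvLastDict_get?_aux datadomain v datadomain.length

theorem pvLastDict_nodup_keys (datadomain : List Int) :
    (pvLastDict datadomain).keys.Nodup :=
  PySem.Dict.nodup_keys_foldl_insert_key _ (fun i => PySem.List.pyGetD datadomain i 0)
    (fun _ i => i) _ PySem.Dict.nodup_keys_empty

theorem pvLastDict_mem_items (datadomain : List Int) (p : Int × Int)
    (hp : p ∈ (pvLastDict datadomain).items) :
    0 ≤ p.2 ∧ p.2.toNat < datadomain.length := by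
  have h := PySem.Dict.get?_of_mem_items _ (by exact hp) (pvLastDict_nodup_keys datadomain)
  rw [pvLastDict_get?] at h
  have := pvLastIdx_bounds datadomain p.1 datadomain.length p.2 h
  exact ⟨this.1, this.2.1⟩

-- ===== VERDICT (by name: the statement is the Claim_ definition above) =====
theorem GetRawdatacount_spec : Claim_equal_GetRawdatacount := by
  intro sourcedata datadomain _
  unfold Spec_GetRawdatacount GetRawdatacount GetRawdatacount_alt
  simp only []
  have hB : (List.foldl (fun m p => m.insert p.2 p.1) PySem.Dict.empty
      (PySem.List.enumerate datadomain)) = pvLastDict datadomain := by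
    rw [PySem.List.enumerate_eq_map_pyRange datadomain 0, List.foldl_map]
    rfl
  rw [hB]
  refine Eq.trans (PySem.List.foldl_pyRange_zero_pyGetD' sourcedata 0
    (pvStepA (pvLastDict datadomain)) (PySem.List.pyRepeat [0] (datadomain.length : Int))) ?_
  have hcl0 : PySem.List.pyRepeat [0] (datadomain.length : Int)
      = List.replicate datadomain.length (0 : Int) := by
    rw [PySem.List.pyRepeat_singleton]; simp
  rw [hcl0]
  have hm : ∀ v t, (pvLastDict datadomain).get? v = some t →
      0 ≤ t ∧ t.toNat < (List.replicate datadomain.length (0 : Int)).length := by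
    intro v t h
    rw [pvLastDict_get?] at h
    have := pvLastIdx_bounds datadomain v datadomain.length t h
    simpa using ⟨this.1, this.2.1⟩
  have hinj : ∀ p ∈ (pvLastDict datadomain).items, ∀ q ∈ (pvLastDict datadomain).items,
      p.2 = q.2 → p.1 = q.1 := by
    intro p hp q hq hpq
    have h1 := PySem.Dict.get?_of_mem_items _ (by exact hp) (pvLastDict_nodup_keys datadomain)
    have h2 := PySem.Dict.get?_of_mem_items _ (by exact hq) (pvLastDict_nodup_keys datadomain)
    rw [pvLastDict_get?] at h1 h2
    exact pvLastIdx_inj datadomain p.1 q.1 datadomain.length p.2 h1 (by rw [hpq] at h1; rw [hpq]; exact h2)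
  have hb : ∀ p ∈ (pvLastDict datadomain).items,
      0 ≤ p.2 ∧ p.2.toNat < (List.replicate datadomain.length (0 : Int)).length := by
    intro p hp
    simpa using pvLastDict_mem_items datadomain p hp
  apply List.ext_getElem
  · rw [pvFoldA_length, pvFoldB_length (fun v =>
      (List.foldl (fun c s => c.insert s (c.getD s 0 + 1)) PySem.Dict.empty sourcedata).getD v 0)]
  · intro j hj1 hj2
    have hjlen : j < (List.replicate datadomain.length (0 : Int)).length := by
      simpa using (by rw [pvFoldA_length] at hj1; simpa using hj1 : j < datadomain.length)
    rw [pvFoldA_char (pvLastDict datadomain) sourcedata _ j hjlen hm,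
        pvFoldB_char (fun v =>
          (List.foldl (fun c s => c.insert s (c.getD s 0 + 1)) PySem.Dict.empty sourcedata).getD v 0)
          (pvLastDict datadomain).items _ j hjlen hb hinj]
    rw [List.getElem_replicate]
    rcases hf : List.find? (fun p => p.2 == (j : Int)) (pvLastDict datadomain).items with _ | p
    · have hzero : List.countP
          (fun s => (pvLastDict datadomain).get? s == some (j : Int)) sourcedata = 0 := by
        apply List.countP_eq_zero.mpr
        intro s _
        simp only [beq_iff_eq]
        intro hs
        have hmem := PySem.Dict.mem_items_of_get?_eq_some _ hs
        have := List.find?_eq_none.mp hf (s, (j : Int)) hmem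
        simp at this
      simp [hf, hzero]
    · have hp2 : p.2 = (j : Int) := by simpa using List.find?_some hf
      have hpmem := List.mem_of_find?_eq_some hf
      have hget : (pvLastDict datadomain).get? p.1 = some (j : Int) := by
        rw [← hp2]
        exact PySem.Dict.get?_of_mem_items _ (by exact hpmem) (pvLastDict_nodup_keys datadomain)
      have hcount : (List.foldl (fun c s => c.insert s (c.getD s 0 + 1))
          PySem.Dict.empty sourcedata).getD p.1 0 = (sourcedata.count p.1 : Int) := by
        rw [PySem.Dict.getD_foldl_insert_add_one]
        simp [PySem.Dict.getD_empty]
      have hcp : List.countP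
          (fun s => (pvLastDict datadomain).get? s == some (j : Int)) sourcedata
          = sourcedata.count p.1 := by
        rw [List.count_eq_countP]
        apply List.countP_congr
        intro s _
        by_cases hs : (pvLastDict datadomain).get? s = some (j : Int)
        · have hsp : s = p.1 := by
            have h2 := hget
            rw [pvLastDict_get?] at hs h2
            exact pvLastIdx_inj datadomain s p.1 datadomain.length _ hs h2
          subst hsp
          simp [hs]
        · have hsp : s ≠ p.1 := by rintro rfl; exact hs hget
          simp [hs, hsp]
      simp [hf, hcp, hcount]
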